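-- pv_equiv track=rewrite | github.com/csci595-research-lit-spring-2024/595-class-project-spring-2024-Mokshithy | src/src/responses/6/q_0952_largestComponentSizeByCommonFactor.py | largestComponentSize
-- ===== SOURCE A (Python) =====
-- from typing import List
--
-- def largestComponentSize(nums: List[int]) -> int:
--     def find(x):
--         if x != parent[x]:
--             parent[x] = find(parent[x])
--         return parent[x]
--
--     def union(x, y):
--         root_x, root_y = find(x), find(y)
--         if root_x != root_y:
--             parent[root_x] = root_y
--             size[root_y] += size[root_x]
--
--     def sieve_of_eratosthenes(n):
--         primes = []
--         is_prime = [True] * (n+1)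
--         for p in range(2, n+1):
--             if is_prime[p]:
--                 primes.append(p)
--                 for i in range(p*p, n+1, p):
--                     is_prime[i] = False
--         return primes
--
--     max_num = max(nums)
--     parent = list(range(max_num + 1))
--     size = [1] * (max_num + 1)
--
--     primes = sieve_of_eratosthenes(max_num)
--
--     num_map = {}
--     for i, num in enumerate(nums):
--         num_map[num] = i
--
--     for num in nums:
--         for p in primes:
--             if p > num:
--                 break
--             if num % p == 0 and p in num_map:
--                 union(num_map[num], num_map[p])
--
--     return max(size)
-- ===== SOURCE B (Python) =====
-- from typing import List
--
-- def largestComponentSize(nums: List[int]) -> int: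
--     # Same union-find on indices as before, but each number is factorized by
--     # trial division (O(sqrt(num)) per number) instead of scanning every
--     # sieved prime up to max(nums); the sieve disappears entirely.
--     def find(x):
--         if x != parent[x]:
--             parent[x] = find(parent[x])
--         return parent[x]
--
--     def union(x, y):
--         root_x, root_y = find(x), find(y)
--         if root_x != root_y:
--             parent[root_x] = root_y
--             size[root_y] += size[root_x]
--
--     max_num = max(nums)
--     parent = list(range(max_num + 1))
--     size = [1] * (max_num + 1)
--
--     num_map = {}
--     for i, num in enumerate(nums):
--         num_map[num] = i
--
--     for num in nums:
--         n = num
--         d = 2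
--         while d * d <= n:
--             if n % d == 0:
--                 if d in num_map:
--                     union(num_map[num], num_map[d])
--                 while n % d == 0:
--                     n //= d
--             d += 1
--         if n > 1 and n in num_map:
--             union(num_map[num], num_map[n])
--
--     return max(size)
-- ===== Notes on version B (the rewrite author's own statement) =====
-- stated objective: faster
-- what changed: B drops the Eratosthenes sieve over [2, max(nums)] and A's per-number scan of every sieved prime, and instead factorizes each number by trial division up to its square root, feeding the same union-find the identical union sequence (the ascending distinct prime divisors present in the list).
import Mathlib
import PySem

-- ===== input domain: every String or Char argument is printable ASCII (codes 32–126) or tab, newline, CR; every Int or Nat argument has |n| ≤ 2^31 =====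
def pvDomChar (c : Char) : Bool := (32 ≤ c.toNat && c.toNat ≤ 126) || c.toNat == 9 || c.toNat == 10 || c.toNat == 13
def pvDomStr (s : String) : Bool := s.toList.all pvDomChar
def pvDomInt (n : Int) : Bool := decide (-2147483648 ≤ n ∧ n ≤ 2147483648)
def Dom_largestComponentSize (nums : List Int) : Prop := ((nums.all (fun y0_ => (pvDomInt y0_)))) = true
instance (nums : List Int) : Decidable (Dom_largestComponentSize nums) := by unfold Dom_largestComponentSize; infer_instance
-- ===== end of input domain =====

-- B replaces A's sieve-all-primes-then-scan with per-number trial-division factorization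
-- (the sieve disappears); same union-find, same return value wherever Python A returns.


-- ===== PORT A =====

-- find(x) with path compression; fuel bounds the recursion depth (Python's recursion
-- always terminates on the acyclic parent forest; fuel = len(parent)+1 suffices there).
def ufFindA : Nat → List Int → Int → List Int × Int
  | 0, parent, _ => (parent, 0)
  | fuel+1, parent, x =>
    let px := PySem.List.pyGetD parent x 0
    if x ≠ px then
      let r := ufFindA fuel parent px
      (PySem.List.pySetD r.1 x r.2, r.2)
    else (parent, px)

def ufUnionA (fuel : Nat) (st : List Int × List Int) (x y : Int) : List Int × List Int :=
  let f1 := ufFindA fuel st.1 x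
  let f2 := ufFindA fuel f1.1 y
  if f1.2 ≠ f2.2 then
    (PySem.List.pySetD f2.1 f1.2 f2.2,
     PySem.List.pySetD st.2 f2.2 (PySem.List.pyGetD st.2 f2.2 0 + PySem.List.pyGetD st.2 f1.2 0))
  else (f2.1, st.2)

-- sieve_of_eratosthenes(n); is_prime and primes are Python lists with O(1)
-- indexing/append, ported as Array (push = append, setIfInBounds = is_prime[i] = False:
-- every index Python touches is in range, and i, p are ≥ 2 ≥ 0 so .toNat is exact)
def sieveA (n : Int) : List Int :=
  ((PySem.List.pyRange 2 (n+1) 1).foldl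
    (fun (acc : Array Int × Array Bool) p =>
      if acc.2.getD p.toNat false then
        (acc.1.push p,
         (PySem.List.pyRange (p*p) (n+1) p).foldl
           (fun a i => a.setIfInBounds i.toNat false) acc.2)
      else acc)
    (#[], Array.replicate (n+1).toNat true)).1.toList

-- num_map = {}; for i, num in enumerate(nums): num_map[num] = i
def buildMapA (nums : List Int) : PySem.Dict Int Int :=
  (PySem.List.enumerate nums 0).foldl (fun d p => d.insert p.2 p.1) PySem.Dict.empty

-- inner 'for p in primes: if p > num: break; …'
def loopA (fuel : Nat) (map : PySem.Dict Int Int) (num : Int) :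
    List Int → List Int × List Int → List Int × List Int
  | [], st => st
  | p :: rest, st =>
    if p > num then st
    else if PySem.Int.mod num p == 0 && map.contains p then
      loopA fuel map num rest (ufUnionA fuel st (map.getD num 0) (map.getD p 0))
    else loopA fuel map num rest st

def largestComponentSize (nums : List Int) : Int :=
  match PySem.List.max? nums (fun y => y) with
  | none => 0   -- max([]) raises ValueError in Python; excluded by Pre_
  | some m =>
    let parent := PySem.List.pyRange 0 (m+1) 1
    let size := List.replicate (m+1).toNat (1 : Int)
    let primes := sieveA m
    let map := buildMapA nums
    let fuel := (m+1).toNat + 1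
    let st := nums.foldl (fun st num => loopA fuel map num primes st) (parent, size)
    match PySem.List.max? st.2 (fun y => y) with
    | none => 0   -- max([]) raises ValueError in Python (max_num < 0); excluded by Pre_
    | some r => r

-- ===== PORT B =====

def ufFindB : Nat → List Int → Int → List Int × Int
  | 0, parent, _ => (parent, 0)
  | fuel+1, parent, x =>
    let px := PySem.List.pyGetD parent x 0
    if x ≠ px then
      let r := ufFindB fuel parent px
      (PySem.List.pySetD r.1 x r.2, r.2)
    else (parent, px)

def ufUnionB (fuel : Nat) (st : List Int × List Int) (x y : Int) : List Int × List Int :=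
  let f1 := ufFindB fuel st.1 x
  let f2 := ufFindB fuel f1.1 y
  if f1.2 ≠ f2.2 then
    (PySem.List.pySetD f2.1 f1.2 f2.2,
     PySem.List.pySetD st.2 f2.2 (PySem.List.pyGetD st.2 f2.2 0 + PySem.List.pyGetD st.2 f1.2 0))
  else (f2.1, st.2)

def buildMapB (nums : List Int) : PySem.Dict Int Int :=
  (PySem.List.enumerate nums 0).foldl (fun d p => d.insert p.2 p.1) PySem.Dict.empty

-- 'while n % d == 0: n //= d' (fuel: n shrinks at every division, n.toNat suffices)
def divOutB : Nat → Int → Int → Int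
  | 0, n, _ => n
  | f+1, n, d => if PySem.Int.mod n d == 0 then divOutB f (PySem.Int.floordiv n d) d else n

-- 'd = 2; while d*d <= n: …; d += 1' (fuel: d grows every iteration, num.toNat+1 suffices)
def trialB (ufuel : Nat) (map : PySem.Dict Int Int) (num : Int) :
    Nat → Int → Int → List Int × List Int → (List Int × List Int) × Int
  | 0, _, n, st => (st, n)
  | f+1, d, n, st =>
    if d * d ≤ n then
      if PySem.Int.mod n d == 0 then
        let st' := if map.contains d then ufUnionB ufuel st (map.getD num 0) (map.getD d 0) else st
        trialB ufuel map num f (d+1) (divOutB n.toNat n d) st'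
      else trialB ufuel map num f (d+1) n st
    else (st, n)

-- whole body of B's 'for num in nums' loop
def procB (ufuel : Nat) (map : PySem.Dict Int Int) (num : Int)
    (st : List Int × List Int) : List Int × List Int :=
  let r := trialB ufuel map num (num.toNat + 1) 2 num st
  if r.2 > 1 && map.contains r.2 then ufUnionB ufuel r.1 (map.getD num 0) (map.getD r.2 0)
  else r.1

def largestComponentSize_alt (nums : List Int) : Int :=
  match PySem.List.max? nums (fun y => y) with
  | none => 0   -- max([]) raises ValueError in Python; excluded by Pre_
  | some m =>
    let parent := PySem.List.pyRange 0 (m+1) 1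
    let size := List.replicate (m+1).toNat (1 : Int)
    let map := buildMapB nums
    let fuel := (m+1).toNat + 1
    let st := nums.foldl (fun st num => procB fuel map num st) (parent, size)
    match PySem.List.max? st.2 (fun y => y) with
    | none => 0
    | some r => r

-- ===== PRECONDITION & SPEC =====

-- max(nums) (meaningful for nums ≠ [])
def pvListMax (l : List Int) : Int := l.foldl max (l.headD 0)
-- index assigned to value v by A's num_map (the LAST position of v in l)
def pvLastIdx (l : List Int) (v : Int) : Int := ((l.length : Int) - 1) - (l.reverse.idxOf v : Nat)

-- Pre_ excludes exactly the inputs where Python A raises: the empty list and max(nums) < 0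
-- (ValueError from max), and inputs where some executed union touches an index beyond
-- max(nums), i.e. beyond the parent/size arrays (IndexError).
def Pre_largestComponentSize (nums : List Int) : Prop :=
  nums ≠ [] ∧ 0 ≤ pvListMax nums ∧
  ∀ num ∈ nums, ∀ p ∈ nums, 2 ≤ p → p ≤ num → Nat.Prime p.toNat → p ∣ num →
    (pvLastIdx nums num ≤ pvListMax nums ∧ pvLastIdx nums p ≤ pvListMax nums)

instance (nums : List Int) : Decidable (Pre_largestComponentSize nums) := by
  unfold Pre_largestComponentSize; infer_instance

def pvWitness_largestComponentSize : List Int := [2, 3, 6, 4]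

def Spec_largestComponentSize (nums : List Int) (out : Int) : Prop := out = largestComponentSize_alt nums
instance (nums : List Int) (out : Int) : Decidable (Spec_largestComponentSize nums out) := by unfold Spec_largestComponentSize; infer_instance

-- ===== CLAIM (what is proved, stated in full; the proofs are below) =====
def Claim_equal_largestComponentSize : Prop := ∀ (nums : List Int), Dom_largestComponentSize nums → Pre_largestComponentSize nums → Spec_largestComponentSize nums (largestComponentSize nums)

-- ===== LEMMAS AND PROOFS =====

theorem pvWitness_ok :
    Dom_largestComponentSize pvWitness_largestComponentSize ∧
    Pre_largestComponentSize pvWitness_largestComponentSize := by decide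

-- The two ports share the union-find mechanics verbatim (both Pythons do).
theorem ufFind_eq : ∀ fuel parent x, ufFindA fuel parent x = ufFindB fuel parent x := by
  intro fuel
  induction fuel with
  | zero => intro parent x; rfl
  | succ f ih => intro parent x; simp [ufFindA, ufFindB, ih]

theorem ufUnion_eq : ufUnionB = ufUnionA := by
  funext fuel st x y; simp [ufUnionA, ufUnionB, ufFind_eq]

-- the effect of one executed 'union(num_map[num], num_map[p])' guarded by 'p in num_map'
def pvStep (fuel : Nat) (map : PySem.Dict Int Int) (num : Int)
    (st : List Int × List Int) (p : Int) : List Int × List Int :=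
  if map.contains p then ufUnionA fuel st (map.getD num 0) (map.getD p 0) else st

-- the ascending list of distinct prime divisors of num (with 'prime' read through toNat)
def pdivs (num : Int) : List Int :=
  (PySem.List.pyRange 2 (num+1) 1).filter
    (fun p => decide (Nat.Prime p.toNat) && decide (p ∣ num))

theorem pdivs_of_le_one (num : Int) (h : num ≤ 1) : pdivs num = [] := by
  unfold pdivs
  rw [PySem.List.pyRange_one_eq_nil (by omega)]
  rfl

theorem mem_pdivs (num p : Int) : p ∈ pdivs num ↔
    (2 ≤ p ∧ p < num + 1 ∧ Nat.Prime p.toNat ∧ p ∣ num) := by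
  simp [pdivs, PySem.List.mem_pyRange_one, and_assoc]

theorem pairwise_pdivs (num : Int) : (pdivs num).Pairwise (· < ·) :=
  (PySem.List.pairwise_lt_pyRange_one 2 (num+1)).filter _

-- two strictly increasing integer lists with the same members are equal
theorem eq_of_lt_sorted_mem (l1 l2 : List Int)
    (h1 : l1.Pairwise (· < ·)) (h2 : l2.Pairwise (· < ·))
    (h : ∀ x, x ∈ l1 ↔ x ∈ l2) : l1 = l2 := by
  have n1 : l1.Nodup := h1.imp (fun {a b} hab => ne_of_lt hab)
  have n2 : l2.Nodup := h2.imp (fun {a b} hab => ne_of_lt hab)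
  have hp : l1.Perm l2 := (List.perm_ext_iff_of_nodup n1 n2).mpr h
  exact hp.eq_of_pairwise (fun a b _ _ hab hba => absurd hba (lt_asymm hab)) h1 h2

-- ----- sieve correctness -----

def sieveStep (n : Int) (acc : List Int × List Bool) (p : Int) : List Int × List Bool :=
  if PySem.List.pyGetD acc.2 p false then
    (acc.1 ++ [p],
     (PySem.List.pyRange (p*p) (n+1) p).foldl (fun a i => PySem.List.pySetD a i false) acc.2)
  else acc

-- j is crossed out after the sieve has processed all p < k
def marked (k : Int) (j : Nat) : Prop := ∃ q : Nat, Nat.Prime q ∧ (q:Int) < k ∧ q ∣ j ∧ q*q ≤ j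

def sieveInv (n k : Int) (acc : List Int × List Bool) : Prop :=
  acc.1 = (PySem.List.pyRange 2 k 1).filter (fun p => decide (Nat.Prime p.toNat)) ∧
  acc.2.length = (n+1).toNat ∧
  ∀ j : Nat, j < (n+1).toNat → (acc.2.getD j false = false ↔ marked k j)

theorem markFold_length (L : List Int) :
    ∀ arr : List Bool, (L.foldl (fun a i => PySem.List.pySetD a i false) arr).length = arr.length := by
  induction L with
  | nil => intro arr; rfl
  | cons i L ih =>
    intro arr
    simp only [List.foldl_cons]
    rw [ih]
    simp [PySem.List.length_pySetD]

theorem markFold_get (L : List Int) (hL : ∀ i ∈ L, 0 ≤ i) :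
    ∀ (arr : List Bool) (j : Nat), j < arr.length →
      ((L.foldl (fun a i => PySem.List.pySetD a i false) arr).getD j false = false ↔
        (arr.getD j false = false ∨ (j:Int) ∈ L)) := by
  induction L with
  | nil => simp
  | cons i L ih =>
    intro arr j hj
    have h0 : (0:Int) ≤ i := hL i (by simp)
    simp only [List.foldl_cons]
    rw [PySem.List.pySetD_of_nonneg _ _ h0]
    rw [ih (fun q hq => hL q (by simp [hq])) _ j (by simpa using hj)]
    have hset : (arr.set i.toNat false).getD j false = if i.toNat = j then false else arr.getD j false := by
      rw [List.getD_eq_getElem?_getD, List.getElem?_set]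
      by_cases hij : i.toNat = j
      · simp [hij, hj ]
      · simp [hij, List.getD_eq_getElem?_getD]
    rw [hset]
    have hcast : ((j:Int) = i) ↔ i.toNat = j := by omega
    by_cases hij : i.toNat = j <;> simp [hij, List.mem_cons, hcast]

theorem unmarked_iff_prime (p : Int) (hp : 2 ≤ p) : ¬ marked p p.toNat ↔ Nat.Prime p.toNat := by
  constructor
  · intro h
    by_contra hnp
    apply h
    have h2 : 2 ≤ p.toNat := by omega
    have hq := Nat.minFac_prime (show p.toNat ≠ 1 by omega)
    have hdvd := Nat.minFac_dvd p.toNat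
    have hsq : p.toNat.minFac * p.toNat.minFac ≤ p.toNat := by
      have h := Nat.minFac_sq_le_self (by omega) hnp
      rwa [pow_two] at h
    have hlt : p.toNat.minFac < p.toNat := by
      have hle := Nat.le_of_dvd (by omega) hdvd
      rcases lt_or_eq_of_le hle with h' | h'
      · exact h'
      · exact absurd (h' ▸ hq) hnp
    exact ⟨p.toNat.minFac, hq, by omega, hdvd, hsq⟩
  · rintro hprime ⟨q, hq, hlt, hdvd, _⟩
    have : q = p.toNat := ((Nat.prime_dvd_prime_iff_eq hq hprime).mp hdvd)
    omega

theorem sieveStep_inv (n k : Int) (acc : List Int × List Bool)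
    (hk : 2 ≤ k) (hkn : k ≤ n) (hinv : sieveInv n k acc) :
    sieveInv n (k+1) (sieveStep n acc k) := by
  obtain ⟨h1, h2, h3⟩ := hinv
  have hkcast : ((k.toNat : Int)) = k := Int.toNat_of_nonneg (by omega)
  have hkrange : k.toNat < (n+1).toNat := by omega
  have hget : PySem.List.pyGetD acc.2 k false = acc.2.getD k.toNat false := by
    have h := PySem.List.pyGetD_natCast acc.2 k.toNat false
    rwa [hkcast] at h
  have hbit := h3 k.toNat hkrange
  unfold sieveStep
  by_cases hb : PySem.List.pyGetD acc.2 k false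
  · -- is_prime[k] is True: k is prime; append k and mark its multiples
    have hb' : acc.2.getD k.toNat false = true := by rw [← hget]; exact hb
    have hnm : ¬ marked k k.toNat := by
      intro hm
      have := hbit.mpr hm
      rw [hb'] at this
      cases this
    have hprime : Nat.Prime k.toNat := (unmarked_iff_prime k hk).mp hnm
    simp only [hb, if_true]
    refine ⟨?_, ?_, ?_⟩
    · rw [PySem.List.pyRange_one_succ_right (by omega : (2:Int) ≤ k), List.filter_append, h1]
      simp [hprime]
    · rw [markFold_length]; exact h2
    · intro j hj
      have hjlen : j < acc.2.length := by omega
      have hLpos : ∀ i ∈ PySem.List.pyRange (k*k) (n+1) k, (0:Int) ≤ i := by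
        intro i hi
        have := (PySem.List.mem_pyRange_iff_of_pos (by omega : (0:Int) < k) i).mp hi
        nlinarith [this.1]
      rw [markFold_get _ hLpos _ j hjlen, h3 j hj,
          PySem.List.mem_pyRange_iff_of_pos (by omega : (0:Int) < k)]
      have hjb : (j:Int) < n + 1 := by omega
      constructor
      · rintro (hm | ⟨hge, _, hdv⟩)
        · obtain ⟨q, hq, hlt, hd, hs⟩ := hm
          exact ⟨q, hq, by omega, hd, hs⟩
        · refine ⟨k.toNat, hprime, by omega, ?_, ?_⟩
          · have : k ∣ (j:Int) := by
              have : k ∣ ((j:Int) - k*k) + k*k := dvd_add hdv ⟨k, rfl⟩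
              simpa using this
            have : (k.toNat : Int) ∣ (j : Int) := by rwa [hkcast]
            exact_mod_cast this
          · have hh : (k.toNat:Int)*(k.toNat:Int) ≤ (j:Int) := by rw [hkcast]; exact hge
            exact_mod_cast hh
      · rintro ⟨q, hq, hlt, hd, hs⟩
        by_cases hqk : (q:Int) < k
        · exact Or.inl ⟨q, hq, hqk, hd, hs⟩
        · have hqe : (q:Int) = k := by omega
          right
          have hkd : k ∣ (j:Int) := by rw [← hqe]; exact_mod_cast hd
          refine ⟨?_, hjb, ?_⟩
          · have : (q:Int)*(q:Int) ≤ (j:Int) := by exact_mod_cast hs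
            rw [hqe] at this; exact this
          · exact dvd_sub hkd (Dvd.intro k rfl)
  · -- is_prime[k] is False: k is composite; nothing changes
    have hm : marked k k.toNat := by
      rw [hget] at hb
      rw [← h3 k.toNat hkrange]
      simpa using hb
    have hnp : ¬ Nat.Prime k.toNat := by
      intro hp
      exact ((unmarked_iff_prime k hk).mpr hp) hm
    have hbf : PySem.List.pyGetD acc.2 k false = false := by simpa using hb
    simp only [hbf, Bool.false_eq_true, if_false]
    refine ⟨?_, h2, ?_⟩
    · rw [PySem.List.pyRange_one_succ_right (by omega : (2:Int) ≤ k), List.filter_append, ← h1]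
      simp [hnp]
    · intro j hj
      rw [h3 j hj]
      constructor
      · rintro ⟨q, hq, hlt, hd, hs⟩; exact ⟨q, hq, by omega, hd, hs⟩
      · rintro ⟨q, hq, hlt, hd, hs⟩
        refine ⟨q, hq, ?_, hd, hs⟩
        rcases lt_or_eq_of_le (by omega : (q:Int) ≤ k) with h' | h'
        · exact h'
        · exfalso; apply hnp
          have hqe : k.toNat = q := by omega
          rw [hqe]; exact hq

theorem sieveFold_inv (n : Int) : ∀ t : Nat, (2 + (t:Int)) ≤ n + 1 →
    sieveInv n (2 + t)
      ((PySem.List.pyRange 2 (2 + (t:Int)) 1).foldl (sieveStep n)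
        ([], List.replicate (n+1).toNat true)) := by
  intro t
  induction t with
  | zero =>
    intro _
    refine ⟨?_, by simp, ?_⟩
    · rw [PySem.List.pyRange_one_eq_nil (by omega)]; rfl
    · intro j hj
      rw [PySem.List.pyRange_one_eq_nil (by omega), List.foldl_nil]
      constructor
      · intro h
        rw [List.getD_eq_getElem?_getD] at h
        simp [hj] at h
      · rintro ⟨q, hq, hlt, _, _⟩
        have := hq.two_le
        push_cast at hlt
        omega
  | succ t ih =>
    intro hle
    have h1 : (2 + ((t:Int) + 1)) = (2 + (t:Int)) + 1 := by ring
    have h2 : (2:Int) ≤ 2 + (t:Int) := by omega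
    push_cast
    rw [h1, PySem.List.pyRange_one_succ_right h2, List.foldl_append, List.foldl_cons, List.foldl_nil]
    have := sieveStep_inv n (2 + (t:Int)) _ h2 (by omega) (ih (by omega))
    convert this using 2

-- the Array-level fold of the port mirrors the List-level fold reasoned about above
def sieveStepArr (n : Int) (acc : Array Int × Array Bool) (p : Int) : Array Int × Array Bool :=
  if acc.2.getD p.toNat false then
    (acc.1.push p,
     (PySem.List.pyRange (p*p) (n+1) p).foldl
       (fun a i => a.setIfInBounds i.toNat false) acc.2)
  else acc

theorem getD_toList (a : Array Bool) (i : Nat) (d : Bool) : a.toList.getD i d = a.getD i d := by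
  rw [List.getD_eq_getElem?_getD, Array.getD_eq_getD_getElem?]
  simp

theorem mirror_inner (L : List Int) (hL : ∀ i ∈ L, (0:Int) ≤ i) :
    ∀ a : Array Bool, (L.foldl (fun a i => a.setIfInBounds i.toNat false) a).toList
      = L.foldl (fun l i => PySem.List.pySetD l i false) a.toList := by
  induction L with
  | nil => intro a; rfl
  | cons i L ih =>
    intro a
    simp only [List.foldl_cons]
    rw [ih (fun q hq => hL q (by simp [hq]))]
    congr 1
    rw [Array.toList_setIfInBounds, PySem.List.pySetD_of_nonneg _ _ (hL i (by simp))]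

theorem mirror_step (n : Int) (acc : Array Int × Array Bool) (p : Int) (hp : 2 ≤ p) :
    ((sieveStepArr n acc p).1.toList, (sieveStepArr n acc p).2.toList)
      = sieveStep n (acc.1.toList, acc.2.toList) p := by
  unfold sieveStepArr sieveStep
  have hcond : PySem.List.pyGetD acc.2.toList p false = acc.2.getD p.toNat false := by
    have h := PySem.List.pyGetD_natCast acc.2.toList p.toNat false
    rw [Int.toNat_of_nonneg (by omega : (0:Int) ≤ p)] at h
    rw [h, getD_toList]
  rw [hcond]
  by_cases hb : acc.2.getD p.toNat false
  · simp only [hb, if_true]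
    refine Prod.ext ?_ ?_
    · simp [Array.toList_push]
    · simp only []
      refine mirror_inner _ ?_ acc.2
      intro i hi
      have := (PySem.List.mem_pyRange_iff_of_pos (by omega : (0:Int) < p) i).mp hi
      nlinarith [this.1]
  · simp only [hb, Bool.false_eq_true, if_false]

theorem mirror_fold (n : Int) : ∀ (L : List Int), (∀ p ∈ L, (2:Int) ≤ p) →
    ∀ acc : Array Int × Array Bool,
    ((L.foldl (sieveStepArr n) acc).1.toList, (L.foldl (sieveStepArr n) acc).2.toList)
      = L.foldl (sieveStep n) (acc.1.toList, acc.2.toList) := by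
  intro L
  induction L with
  | nil => intro _ acc; rfl
  | cons p L ih =>
    intro hmem acc
    simp only [List.foldl_cons]
    rw [ih (fun q hq => hmem q (by simp [hq])) (sieveStepArr n acc p),
        mirror_step n acc p (hmem p (by simp))]

theorem sieveA_eq (n : Int) :
    sieveA n = (PySem.List.pyRange 2 (n+1) 1).filter (fun p => decide (Nat.Prime p.toNat)) := by
  have hmem : ∀ p ∈ PySem.List.pyRange 2 (n+1) 1, (2:Int) ≤ p := fun p hp =>
    ((PySem.List.mem_pyRange_one).mp hp).1
  have hm := mirror_fold n (PySem.List.pyRange 2 (n+1) 1) hmem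
    (#[], Array.replicate (n+1).toNat true)
  have h1 : sieveA n = ((PySem.List.pyRange 2 (n+1) 1).foldl (sieveStep n)
      ([], List.replicate (n+1).toNat true)).1 := by
    have h := congrArg Prod.fst hm
    simpa [Array.toList_replicate] using h
  rw [h1]
  by_cases hn : 1 ≤ n
  · have ht : (2 + (((n-1).toNat : Nat) : Int)) = n + 1 := by omega
    have hinv := (sieveFold_inv n (n-1).toNat (by omega)).1
    rw [ht] at hinv
    exact hinv
  · rw [PySem.List.pyRange_one_eq_nil (by omega : n + 1 ≤ 2)]
    simp

-- ----- A's inner loop = fold over pdivs -----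

theorem loopA_eq_foldl (fuel : Nat) (map : PySem.Dict Int Int) (num : Int) :
    ∀ (L : List Int) (st : List Int × List Int), L.Pairwise (· < ·) →
    loopA fuel map num L st =
      (L.filter (fun p => decide (p ≤ num) && decide (p ∣ num))).foldl (pvStep fuel map num) st := by
  intro L
  induction L with
  | nil => intro st _; rfl
  | cons p rest ih =>
    intro st hpw
    obtain ⟨hall, hrest⟩ := List.pairwise_cons.mp hpw
    by_cases h1 : p > num
    · have hfil : (p :: rest).filter (fun p => decide (p ≤ num) && decide (p ∣ num)) = [] := by
        apply List.filter_eq_nil_iff.mpr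
        intro q hq
        rcases List.mem_cons.mp hq with h | h
        · subst h; simp only [Bool.and_eq_true, decide_eq_true_eq, not_and]; intro; omega
        · have := hall q h; simp only [Bool.and_eq_true, decide_eq_true_eq, not_and]; intro; omega
      rw [hfil]
      simp [loopA, h1]
    · rw [not_lt] at h1
      by_cases h2 : p ∣ num
      · have hmod : (PySem.Int.mod num p == 0) = true := by
          simp [PySem.Int.mod_eq_zero_iff_dvd]; exact h2
        have hfil : (p :: rest).filter (fun p => decide (p ≤ num) && decide (p ∣ num)) =
            p :: rest.filter (fun p => decide (p ≤ num) && decide (p ∣ num)) := by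
          simp [h1, h2]
        rw [hfil, List.foldl_cons]
        by_cases hc : map.contains p
        · have hstep : pvStep fuel map num st p = ufUnionA fuel st (map.getD num 0) (map.getD p 0) := by
            simp [pvStep, hc]
          rw [hstep, ← ih _ hrest]
          simp only [loopA, hmod, hc]
          rw [if_neg (by omega : ¬ p > num)]
          simp
        · have hstep : pvStep fuel map num st p = st := by simp [pvStep, hc]
          rw [hstep, ← ih _ hrest]
          simp only [loopA, hmod]
          rw [if_neg (by omega : ¬ p > num)]
          simp [hc]
      · have hmod : (PySem.Int.mod num p == 0) = false := by
          simp [PySem.Int.mod_eq_zero_iff_dvd]; exact h2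
        have hfil : (p :: rest).filter (fun p => decide (p ≤ num) && decide (p ∣ num)) =
            rest.filter (fun p => decide (p ≤ num) && decide (p ∣ num)) := by
          simp [h2]
        rw [hfil]
        simp only [loopA, hmod, Bool.false_and, if_neg (by omega : ¬ p > num)]
        exact ih _ hrest

theorem primes_filter_eq (m num : Int) (h : num ≤ m) :
    ((PySem.List.pyRange 2 (m+1) 1).filter (fun p => decide (Nat.Prime p.toNat))).filter
        (fun p => decide (p ≤ num) && decide (p ∣ num)) = pdivs num := by
  apply eq_of_lt_sorted_mem
  · exact ((PySem.List.pairwise_lt_pyRange_one 2 (m+1)).filter _).filter _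
  · exact pairwise_pdivs num
  · intro x
    simp only [List.mem_filter, mem_pdivs, PySem.List.mem_pyRange_one]
    constructor
    · rintro ⟨⟨⟨hx2, _⟩, hp⟩, hcond⟩
      simp at hp hcond
      exact ⟨hx2, by omega, hp, hcond.2⟩
    · rintro ⟨hx2, hlt, hp, hd⟩
      refine ⟨⟨⟨hx2, by omega⟩, by simpa using hp⟩, ?_⟩
      simp
      exact ⟨by omega, hd⟩

theorem loopA_pdivs (fuel : Nat) (map : PySem.Dict Int Int) (m num : Int) (h : num ≤ m)
    (st : List Int × List Int) :
    loopA fuel map num (sieveA m) st = (pdivs num).foldl (pvStep fuel map num) st := by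
  rw [sieveA_eq, loopA_eq_foldl _ _ _ _ _ ((PySem.List.pairwise_lt_pyRange_one 2 (m+1)).filter _),
      primes_filter_eq m num h]

-- ----- B's trial division = fold over pdivs -----

theorem divOut_spec (d : Int) (hd : 2 ≤ d) :
    ∀ (fuel : Nat) (n : Int), 1 ≤ n → n.toNat ≤ fuel →
    ∃ k : Nat, n = d ^ k * (divOutB fuel n d) ∧ ¬ d ∣ (divOutB fuel n d) ∧ 1 ≤ divOutB fuel n d := by
  intro fuel
  induction fuel with
  | zero => intro n hn hf; omega
  | succ f ih =>
    intro n hn hf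
    by_cases h : d ∣ n
    · have hmod : (PySem.Int.mod n d == 0) = true := by
        simp [PySem.Int.mod_eq_zero_iff_dvd]; exact h
      have hdn : d ≤ n := Int.le_of_dvd (by omega) h
      have hdiv : PySem.Int.floordiv n d = n / d := PySem.Int.floordiv_eq_ediv_of_pos (by omega)
      have hpos : 1 ≤ n / d := by
        rw [Int.le_ediv_iff_mul_le (by omega)]; omega
      have hcan : d * (n / d) = n := Int.mul_ediv_cancel' h
      have hlt : n / d < n := by nlinarith
      obtain ⟨k, hfact, hnd, hge⟩ := ih (n / d) hpos (by omega)
      refine ⟨k + 1, ?_, ?_, ?_⟩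
      · simp only [divOutB, hmod, if_true, hdiv]
        calc n = d * (n / d) := hcan.symm
          _ = d * (d ^ k * divOutB f (n / d) d) := by rw [← hfact]
          _ = d ^ (k+1) * divOutB f (n / d) d := by ring
      · simp only [divOutB, hmod, if_true, hdiv]; exact hnd
      · simp only [divOutB, hmod, if_true, hdiv]; exact hge
    · have hmod : (PySem.Int.mod n d == 0) = false := by
        simp [PySem.Int.mod_eq_zero_iff_dvd]; exact h
      refine ⟨0, ?_, ?_, ?_⟩ <;> simp [divOutB, hmod, h, hn]

theorem smallest_divisor_prime (d n : Int) (hd : 2 ≤ d) (_hn : 1 ≤ n) (hdvd : d ∣ n)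
    (hinv : ∀ q : Int, 2 ≤ q → q < d → ¬ q ∣ n) : Nat.Prime d.toNat := by
  by_contra hnp
  have h2 : 2 ≤ d.toNat := by omega
  have hq := Nat.minFac_prime (show d.toNat ≠ 1 by omega)
  have hqd := Nat.minFac_dvd d.toNat
  have hlt : d.toNat.minFac < d.toNat := by
    have hle := Nat.le_of_dvd (by omega) hqd
    rcases lt_or_eq_of_le hle with h' | h'
    · exact h'
    · exact absurd (h' ▸ hq) hnp
  have hcast : ((d.toNat : Nat) : Int) = d := Int.toNat_of_nonneg (by omega)
  have hqdvdInt : ((d.toNat.minFac : Nat) : Int) ∣ n := by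
    refine dvd_trans ?_ hdvd
    rw [← hcast]
    exact_mod_cast hqd
  exact hinv (d.toNat.minFac : Int) (by exact_mod_cast hq.two_le) (by omega) hqdvdInt

theorem no_small_factor_prime (d n : Int) (hd : 2 ≤ d) (hn : 2 ≤ n) (hlt : n < d * d)
    (hinv : ∀ q : Int, 2 ≤ q → q < d → ¬ q ∣ n) : Nat.Prime n.toNat := by
  by_contra hnp
  have h2 : 2 ≤ n.toNat := by omega
  have hq := Nat.minFac_prime (show n.toNat ≠ 1 by omega)
  have hqd := Nat.minFac_dvd n.toNat
  have hsq : n.toNat.minFac * n.toNat.minFac ≤ n.toNat := by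
    have h := Nat.minFac_sq_le_self (by omega) hnp
    rwa [pow_two] at h
  have hcast : ((n.toNat : Nat) : Int) = n := Int.toNat_of_nonneg (by omega)
  set q := n.toNat.minFac with hqdef
  have hqInt : ((q : Nat) : Int) ∣ n := by
    rw [← hcast]; exact_mod_cast hqd
  have hqlt : ((q : Nat) : Int) < d := by
    by_contra hge
    rw [not_lt] at hge
    have hdq : d * d ≤ ((q:Nat):Int) * ((q:Nat):Int) :=
      mul_le_mul hge hge (by omega) (by positivity)
    have h2' : ((q*q : Nat) : Int) ≤ ((n.toNat : Nat) : Int) := by exact_mod_cast hsq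
    push_cast at h2'
    rw [hcast] at h2'
    linarith
  exact hinv (q : Int) (by exact_mod_cast hq.two_le) hqlt hqInt

theorem int_prime_dvd_eq (x n : Int) (hx2 : 2 ≤ x) (hxp : Nat.Prime x.toNat)
    (hn2 : 2 ≤ n) (hnp : Nat.Prime n.toNat) (hdvd : x ∣ n) : x = n := by
  have hx : ((x.toNat : Nat) : Int) = x := Int.toNat_of_nonneg (by omega)
  have hn : ((n.toNat : Nat) : Int) = n := Int.toNat_of_nonneg (by omega)
  have hdn : x.toNat ∣ n.toNat := by
    have : ((x.toNat : Nat) : Int) ∣ ((n.toNat : Nat) : Int) := by rw [hx, hn]; exact hdvd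
    exact_mod_cast this
  have := (Nat.prime_dvd_prime_iff_eq hxp hnp).mp hdn
  omega

theorem pdivs_prime (n : Int) (h2 : 2 ≤ n) (h : Nat.Prime n.toNat) : pdivs n = [n] := by
  apply eq_of_lt_sorted_mem (pdivs n) [n] (pairwise_pdivs n) (by simp)
  intro x
  rw [mem_pdivs]
  simp only [List.mem_singleton]
  constructor
  · rintro ⟨hx2, _, hxp, hdvd⟩
    exact int_prime_dvd_eq x n hx2 hxp h2 h hdvd
  · rintro rfl
    exact ⟨h2, by omega, h, dvd_refl _⟩

theorem pdivs_cons (d n n' : Int) (hd : 2 ≤ d) (hdp : Nat.Prime d.toNat)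
    (k : Nat) (hk : 1 ≤ k) (hfact : n = d ^ k * n') (hn' : 1 ≤ n')
    (hbig : ∀ q : Int, Nat.Prime q.toNat → q ∣ n' → d < q) :
    pdivs n = d :: pdivs n' := by
  have hdk : (0:Int) < d ^ k := pow_pos (by omega) k
  have hn : 1 ≤ n := by nlinarith
  have hdvdn : d ∣ n := by
    rw [hfact]
    exact Dvd.dvd.mul_right (dvd_pow_self d (by omega)) n'
  have hn'dvd : n' ∣ n := (⟨d ^ k, by rw [hfact]; ring⟩ : n' ∣ n)
  apply eq_of_lt_sorted_mem _ _ (pairwise_pdivs n)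
  · rw [List.pairwise_cons]
    refine ⟨?_, pairwise_pdivs n'⟩
    intro x hx
    rw [mem_pdivs] at hx
    exact hbig x hx.2.2.1 hx.2.2.2
  · intro x
    rw [mem_pdivs, List.mem_cons, mem_pdivs]
    constructor
    · rintro ⟨hx2, hxlt, hxp, hdvd⟩
      by_cases hxd : x = d
      · exact Or.inl hxd
      · right
        have hxInt : Prime x := by
          rw [Int.prime_iff_natAbs_prime]
          have hab : x.natAbs = x.toNat := by omega
          rw [hab]; exact hxp
        have hxn' : x ∣ n' := by
          rw [hfact] at hdvd
          rcases hxInt.dvd_mul.mp hdvd with hcase | hcase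
          · exfalso
            have : x ∣ d := hxInt.dvd_of_dvd_pow hcase
            exact hxd (int_prime_dvd_eq x d hx2 hxp hd hdp this)
          · exact hcase
        have hxle : x ≤ n' := Int.le_of_dvd (by omega) hxn'
        exact ⟨hx2, by omega, hxp, hxn'⟩
    · rintro (rfl | ⟨hx2, hxlt, hxp, hdvd⟩)
      · refine ⟨hd, ?_, hdp, hdvdn⟩
        have := Int.le_of_dvd (by omega) hdvdn
        omega
      · have hxn : x ∣ n := dvd_trans hdvd hn'dvd
        have := Int.le_of_dvd (by omega) hxn
        exact ⟨hx2, by omega, hxp, hxn⟩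

theorem trialB_spec (ufuel : Nat) (map : PySem.Dict Int Int) (num : Int) :
    ∀ (fuel : Nat) (d n : Int) (st : List Int × List Int),
    1 ≤ n → 2 ≤ d → n + 2 ≤ d + fuel →
    (∀ q : Int, 2 ≤ q → q < d → ¬ q ∣ n) →
    (let r := trialB ufuel map num fuel d n st
     if r.2 > 1 && map.contains r.2 then ufUnionB ufuel r.1 (map.getD num 0) (map.getD r.2 0)
     else r.1) = (pdivs n).foldl (pvStep ufuel map num) st := by
  intro fuel
  induction fuel with
  | zero =>
    intro d n st hn hd hsum hinv
    have hn1 : n = 1 := by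
      by_contra h
      exact hinv n (by omega) (by omega) (dvd_refl n)
    subst hn1
    simp [trialB, pdivs_of_le_one 1 le_rfl]
  | succ f ih =>
    intro d n st hn hd hsum hinv
    by_cases h1 : d * d ≤ n
    · by_cases h2 : d ∣ n
      · have hmod : (PySem.Int.mod n d == 0) = true := by
          simp [PySem.Int.mod_eq_zero_iff_dvd]; exact h2
        have hdp : Nat.Prime d.toNat := smallest_divisor_prime d n hd hn h2 hinv
        obtain ⟨k, hfact, hnd, hn'⟩ := divOut_spec d hd n.toNat n hn le_rfl
        set n' := divOutB n.toNat n d with hn'def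
        have hk : 1 ≤ k := by
          rcases Nat.eq_zero_or_pos k with hk0 | hk0
          · exfalso
            apply hnd
            have hne : n = n' := by rw [hk0] at hfact; simpa using hfact
            rwa [← hne]
          · exact hk0
        have hdk2 : 2 ≤ d ^ k := by
          calc (2:Int) ≤ d := hd
            _ = d ^ 1 := (pow_one d).symm
            _ ≤ d ^ k := pow_le_pow_right₀ (by omega) hk
        have hlt : n' < n := by nlinarith
        have hinv' : ∀ q : Int, 2 ≤ q → q < d + 1 → ¬ q ∣ n' := by
          intro q hq2 hqlt hqdvd
          by_cases hqd : q = d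
          · exact hnd (hqd ▸ hqdvd)
          · exact hinv q hq2 (by omega) (dvd_trans hqdvd ((⟨d ^ k, by rw [hfact]; ring⟩ : n' ∣ n)))
        have hbig : ∀ q : Int, Nat.Prime q.toNat → q ∣ n' → d < q := by
          intro q hqp hqdvd
          have hq2 : 2 ≤ q := by
            have := hqp.two_le; omega
          by_contra hle
          exact hinv' q hq2 (by omega) hqdvd
        rw [pdivs_cons d n n' hd hdp k hk hfact hn' hbig, List.foldl_cons]
        have hIH := ih (d+1) n' (pvStep ufuel map num st d) hn' (by omega) (by omega) hinv'
        rw [← hIH]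
        simp only [trialB, hmod, if_pos h1, if_true]
        have hst : (if map.contains d then ufUnionB ufuel st (map.getD num 0) (map.getD d 0) else st)
            = pvStep ufuel map num st d := by
          rw [ufUnion_eq]; rfl
        rw [hst]
      · have hmod : (PySem.Int.mod n d == 0) = false := by
          simp [PySem.Int.mod_eq_zero_iff_dvd]; exact h2
        have hinv' : ∀ q : Int, 2 ≤ q → q < d + 1 → ¬ q ∣ n := by
          intro q hq2 hqlt hqdvd
          by_cases hqd : q = d
          · exact h2 (hqd ▸ hqdvd)
          · exact hinv q hq2 (by omega) hqdvd
        have hIH := ih (d+1) n st hn (by omega) (by omega) hinv'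
        rw [← hIH]
        simp only [trialB, hmod, if_pos h1, Bool.false_eq_true, if_false]
    · rw [not_le] at h1
      by_cases hn2 : 2 ≤ n
      · have hprime : Nat.Prime n.toNat := no_small_factor_prime d n hd hn2 h1 hinv
        rw [pdivs_prime n hn2 hprime, List.foldl_cons, List.foldl_nil]
        simp only [trialB, if_neg (by omega : ¬ d * d ≤ n)]
        rw [ufUnion_eq]
        simp only [pvStep]
        by_cases hc : map.contains n
        · simp [hc, show (1:Int) < n by omega]
        · simp [hc]
      · have hn1 : n = 1 := by omega
        subst hn1
        simp [trialB, if_neg (by omega : ¬ d * d ≤ 1), pdivs_of_le_one 1 le_rfl]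

theorem procB_pdivs (ufuel : Nat) (map : PySem.Dict Int Int) (num : Int)
    (st : List Int × List Int) :
    procB ufuel map num st = (pdivs num).foldl (pvStep ufuel map num) st := by
  by_cases h : 1 ≤ num
  · have hcast : ((num.toNat : Nat) : Int) = num := Int.toNat_of_nonneg (by omega)
    have := trialB_spec ufuel map num (num.toNat + 1) 2 num st h le_rfl
      (by push_cast; omega) (by intro q hq hlt; omega)
    exact this
  · have h0 : num.toNat = 0 := by omega
    unfold procB
    rw [h0]
    simp [trialB, show ¬ (4:Int) ≤ num by omega, show ¬ (1:Int) < num by omega,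
      pdivs_of_le_one num (by omega)]

-- ----- top level -----

theorem ports_eq (nums : List Int) : largestComponentSize nums = largestComponentSize_alt nums := by
  unfold largestComponentSize largestComponentSize_alt
  cases hm : PySem.List.max? nums (fun y => y) with
  | none => rfl
  | some m =>
    simp only []
    have hmap : buildMapA nums = buildMapB nums := rfl
    have hfold : nums.foldl
        (fun st num => loopA ((m+1).toNat + 1) (buildMapA nums) num (sieveA m) st)
        (PySem.List.pyRange 0 (m+1) 1, List.replicate (m+1).toNat (1 : Int)) =
      nums.foldl
        (fun st num => procB ((m+1).toNat + 1) (buildMapB nums) num st)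
        (PySem.List.pyRange 0 (m+1) 1, List.replicate (m+1).toNat (1 : Int)) := by
      rw [← hmap]
      apply PySem.List.foldl_congr_mem
      intro st num hnum
      have hle : num ≤ m := PySem.List.max?_isMax hm num hnum
      rw [loopA_pdivs _ _ m num hle, procB_pdivs]
    rw [hfold]

-- ===== VERDICT (by name: the statement is the Claim_ definition above) =====
theorem largestComponentSize_spec : Claim_equal_largestComponentSize := by
  intro nums _ _
  show largestComponentSize nums = largestComponentSize_alt nums
  exact ports_eq nums
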